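-- pv_equiv track=rewrite | github.com/kmpardav/CostPilot | azure_cost_architect/planner/presets.py | _ensure_resource
-- ===== SOURCE A (Python) =====
-- from typing import Dict, Iterable, List, Tuple
--
-- def _resource_ids(resources: Iterable[Dict]) -> set[str]:
--     return {res.get("id", "") for res in resources if isinstance(res, dict)}
--
-- def _make_unique_id(base: str, existing: set[str]) -> str:
--     if base not in existing:
--         return base
--     idx = 2
--     while f"{base}-{idx}" in existing:
--         idx += 1
--     return f"{base}-{idx}"
--
-- def _ensure_resource(resources: List[Dict], template: Dict) -> Dict | None:
--     existing_ids = _resource_ids(resources)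
--     if any(
--         res.get("category") == template.get("category") and res.get("source") != "preset"
--         for res in resources
--         if isinstance(res, dict)
--     ):
--         return None
--
--     resource = template.copy()
--     resource["id"] = _make_unique_id(template.get("id", "res"), existing_ids)
--     resources.append(resource)
--     return resource
-- ===== SOURCE B (Python) =====
-- from typing import Dict, List
--
--
-- def _decode_suffix(rid: str, prefix: str):
--     """If rid == prefix + canonical decimal digits, return that number, else None."""
--     if not rid.startswith(prefix):
--         return None
--     suf = rid[len(prefix):]
--     if not suf.isdigit():
--         return None
--     if len(suf) > 1 and suf[0] == "0":
--         return None
--     value = 0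
--     for ch in suf:
--         value = value * 10 + (ord(ch) - 48)
--     return value
--
--
-- def _ensure_resource(resources: List[Dict], template: Dict) -> Dict | None:
--     cat = template.get("category")
--     for res in resources:
--         if isinstance(res, dict) and res.get("category") == cat and res.get("source") != "preset":
--             return None
--
--     base = template.get("id", "res")
--     prefix = base + "-"
--     base_taken = False
--     taken = set()
--     for res in resources:
--         if not isinstance(res, dict):
--             continue
--         rid = res.get("id", "")
--         if rid == base:
--             base_taken = True
--         else:
--             k = _decode_suffix(rid, prefix)
--             if k is not None:
--                 taken.add(k)
--
--     if not base_taken: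
--         new_id = base
--     else:
--         k = 2
--         for t in sorted(taken):
--             if t == k:
--                 k += 1
--             elif t > k:
--                 break
--         new_id = f"{base}-{k}"
--
--     resource = dict(template)
--     resource["id"] = new_id
--     resources.append(resource)
--     return resource
-- ===== Notes on version B (the rewrite author's own statement) =====
-- stated objective: alternative
-- what changed: A probes candidate ids base, base-2, base-3, ... one by one against the set of all existing ids until a free one is found; B never probes: it parses each existing id once, extracting the canonical decimal suffix after 'base-' (or noting that base itself is taken), and computes the smallest free index by a single sort-and-scan mex over the extracted numbers.
import Mathlib
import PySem

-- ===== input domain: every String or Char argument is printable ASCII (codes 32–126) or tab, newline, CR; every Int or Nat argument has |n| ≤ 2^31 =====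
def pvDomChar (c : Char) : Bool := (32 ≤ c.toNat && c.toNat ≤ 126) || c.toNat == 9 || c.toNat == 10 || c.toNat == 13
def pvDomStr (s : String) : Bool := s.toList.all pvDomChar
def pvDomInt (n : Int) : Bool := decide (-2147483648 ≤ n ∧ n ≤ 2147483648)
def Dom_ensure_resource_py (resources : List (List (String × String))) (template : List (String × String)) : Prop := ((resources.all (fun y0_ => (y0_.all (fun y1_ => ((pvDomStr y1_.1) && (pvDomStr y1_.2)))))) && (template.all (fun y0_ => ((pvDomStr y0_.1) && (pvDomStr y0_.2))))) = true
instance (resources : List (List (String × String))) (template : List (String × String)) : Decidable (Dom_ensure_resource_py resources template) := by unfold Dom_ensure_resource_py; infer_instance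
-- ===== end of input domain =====

-- ===== PORT A =====
-- B replaces A's probe loop (try base, base-2, base-3, ... against the id set) by parsing the
-- numeric suffixes of the existing ids once and taking a sort-and-scan mex (objective: alternative).
-- Both Pythons append the new resource to `resources` in place (same mutation in A and B);
-- the equivalence proved here is about the RETURN value only.

-- _resource_ids: {res.get("id", "") for res in resources}  (isinstance(res, dict) always holds under the type convention)
def pvResourceIds (resources : List (List (String × String))) : PySem.Set String :=
  resources.foldl (fun s r => PySem.Set.add s ((PySem.Dict.ofList r).getD "id" "")) PySem.Set.empty

-- the while-loop of _make_unique_id; `fuel` only makes the recursion structural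
-- (the caller passes enough fuel for every input: see pv_suffixLoop_eq_mex below)
def pvSuffixLoop (base : String) (existing : PySem.Set String) : Nat → Nat → String
  | idx, 0 => base ++ "-" ++ toString idx
  | idx, fuel+1 =>
      if PySem.Set.contains existing (base ++ "-" ++ toString idx) then
        pvSuffixLoop base existing (idx+1) fuel
      else base ++ "-" ++ toString idx

def pvMakeUniqueId (base : String) (existing : PySem.Set String) (fuel : Nat) : String :=
  if PySem.Set.contains existing base then pvSuffixLoop base existing 2 fuel else base

def ensure_resource_py (resources : List (List (String × String))) (template : List (String × String)) : Option (List (String × String)) :=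
  let existingIds := pvResourceIds resources
  if resources.any (fun r =>
      ((PySem.Dict.ofList r).get? "category" == (PySem.Dict.ofList template).get? "category")
        && !((PySem.Dict.ofList r).get? "source" == some "preset")) then
    none
  else
    let newId := pvMakeUniqueId ((PySem.Dict.ofList template).getD "id" "res") existingIds
        (resources.length + 1)
    some (((PySem.Dict.ofList template).insert "id" newId).items)

-- ===== PORT B =====
-- _decode_suffix of Source B: rid must be pfx + canonical decimal digits; the digit fold mirrors
-- `value = value * 10 + (ord(ch) - 48)` (Nat is exact here: ord(ch) ≥ 48 for the digit chars the
-- guard admits, and the value is a nonnegative Python int)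
def pvDecodeSuffix (rid pfx : String) : Option Nat :=
  if PySem.Str.startswith rid pfx then
    let suf := PySem.Str.slice rid (some (PySem.Str.len pfx)) none
    if PySem.Str.strIsdigit suf then
      if 1 < PySem.Str.len suf ∧ PySem.Str.pyGet? suf 0 = some '0' then none
      else some (suf.toList.foldl (fun v c => v * 10 + (c.toNat - 48)) 0)
    else none
  else none

-- Source B's first loop: early `return None` on a conflicting resource
def pvFindConflict (tcat : Option String) : List (List (String × String)) → Bool
  | [] => false
  | r :: rest =>
      if ((PySem.Dict.ofList r).get? "category" == tcat)
          && !((PySem.Dict.ofList r).get? "source" == some "preset") then true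
      else pvFindConflict tcat rest

-- Source B's mex scan: `for t in sorted(taken): if t == k: k += 1 elif t > k: break`
def pvMexLoop : List Nat → Nat → Nat
  | [], k => k
  | t :: ts, k => if t = k then pvMexLoop ts (k + 1) else if k < t then k else pvMexLoop ts k

-- the body of Source B's second loop: set the base_taken flag or add the decoded suffix number
def pvScanStep (base pfx : String) (st : Bool × PySem.Set Nat) (r : List (String × String)) :
    Bool × PySem.Set Nat :=
  let rid := (PySem.Dict.ofList r).getD "id" ""
  if rid == base then (true, st.2)
  else match pvDecodeSuffix rid pfx with
    | some k => (st.1, PySem.Set.add st.2 k)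
    | none => st

def ensure_resource_py_alt (resources : List (List (String × String))) (template : List (String × String)) : Option (List (String × String)) :=
  if pvFindConflict ((PySem.Dict.ofList template).get? "category") resources then none
  else
    let base := (PySem.Dict.ofList template).getD "id" "res"
    let pfx := base ++ "-"
    -- Source B's second loop: base_taken flag and the set of decoded suffix numbers
    let st := resources.foldl (pvScanStep base pfx) (false, PySem.Set.empty)
    let newId :=
      if st.1 then base ++ "-" ++ toString (pvMexLoop (PySem.List.sorted st.2 (fun x => x) false) 2)
      else base
    some (((PySem.Dict.ofList template).insert "id" newId).items)

-- ===== PRECONDITION & SPEC =====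
def Spec_ensure_resource_py (resources : List (List (String × String))) (template : List (String × String)) (out : Option (List (String × String))) : Prop := out = ensure_resource_py_alt resources template
instance (resources : List (List (String × String))) (template : List (String × String)) (out : Option (List (String × String))) : Decidable (Spec_ensure_resource_py resources template out) := by unfold Spec_ensure_resource_py; infer_instance

-- ===== CLAIM (what is proved, stated in full; the proofs are below) =====
def Claim_equal_ensure_resource_py : Prop := ∀ (resources : List (List (String × String))) (template : List (String × String)), Dom_ensure_resource_py resources template → Spec_ensure_resource_py resources template (ensure_resource_py resources template)

-- ===== LEMMAS AND PROOFS =====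

-- decimal value of a digit string, as Source B's fold computes it
def pvDecVal (cs : List Char) : Nat := cs.foldl (fun v c => v * 10 + (c.toNat - 48)) 0

theorem pv_digitChar_toNat {d : Nat} (h : d < 10) : (Nat.digitChar d).toNat = d + 48 := by
  interval_cases d <;> decide

theorem pv_digitChar_isdigit {d : Nat} (h : d < 10) : PySem.Chars.isdigit (Nat.digitChar d) = true := by
  interval_cases d <;> decide

theorem pv_digitChar_ne_zero {d : Nat} (h : d < 10) (h0 : d ≠ 0) : Nat.digitChar d ≠ '0' := by
  interval_cases d <;> simp_all <;> decide

theorem pv_isdigit_toNat {c : Char} (h : PySem.Chars.isdigit c = true) :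
    48 ≤ c.toNat ∧ c.toNat ≤ 57 := by
  simp only [PySem.Chars.isdigit, Bool.and_eq_true, decide_eq_true_eq, Char.le_def] at h
  exact ⟨h.1, h.2⟩

theorem pv_char_eq_digitChar {c : Char} (h : PySem.Chars.isdigit c = true) :
    Nat.digitChar (c.toNat - 48) = c := by
  obtain ⟨h1, h2⟩ := pv_isdigit_toNat h
  have hc := Char.ofNat_toNat c
  generalize hk : c.toNat = k at h1 h2 hc ⊢
  interval_cases k <;> (rw [← hc]; decide)

theorem pv_decVal_append (cs : List Char) (c : Char) :
    pvDecVal (cs ++ [c]) = pvDecVal cs * 10 + (c.toNat - 48) := by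
  simp [pvDecVal, List.foldl_append]

theorem pv_decVal_toDigits (n : Nat) : pvDecVal (Nat.toDigits 10 n) = n := by
  induction n using Nat.strong_induction_on with
  | _ n ih =>
    rw [Nat.toDigits_eq_if (by norm_num)]
    split
    · next h => simp [pvDecVal, pv_digitChar_toNat h]
    · next h =>
      rw [pv_decVal_append, ih (n / 10) (by omega), pv_digitChar_toNat (Nat.mod_lt _ (by norm_num))]
      omega

theorem pv_toDigits_all_digit (n : Nat) : (Nat.toDigits 10 n).all PySem.Chars.isdigit = true := by
  induction n using Nat.strong_induction_on with
  | _ n ih =>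
    rw [Nat.toDigits_eq_if (by norm_num)]
    split
    · next h => simp [pv_digitChar_isdigit h]
    · next h =>
      rw [List.all_append]
      simp only [Bool.and_eq_true]
      refine ⟨ih (n / 10) (by omega), by simp [pv_digitChar_isdigit (Nat.mod_lt _ (by norm_num))]⟩

theorem pv_toDigits_head (n : Nat) (h : n ≠ 0) : (Nat.toDigits 10 n).head? ≠ some '0' := by
  induction n using Nat.strong_induction_on with
  | _ n ih =>
    rw [Nat.toDigits_eq_if (by norm_num)]
    split
    · next hlt =>
      simpa using pv_digitChar_ne_zero hlt h
    · next hge =>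
      rw [List.head?_append]
      have hne : Nat.toDigits 10 (n / 10) ≠ [] :=
        List.ne_nil_of_length_pos Nat.length_toDigits_pos
      obtain ⟨a, as, hcons⟩ := List.exists_cons_of_ne_nil hne
      have := ih (n / 10) (by omega) (by omega)
      rw [hcons] at this ⊢
      simpa using this

theorem pv_isdigit_lt {c : Char} (h : PySem.Chars.isdigit c = true) : c.toNat - 48 < 10 := by
  simp only [PySem.Chars.isdigit, Bool.and_eq_true, decide_eq_true_eq, Char.le_def] at h
  have h2 : c.toNat ≤ 57 := h.2
  omega

theorem pv_foldl_ge_one (cs : List Char) : ∀ v : Nat, 1 ≤ v →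
    1 ≤ cs.foldl (fun v c => v * 10 + (c.toNat - 48)) v := by
  induction cs with
  | nil => intro v hv; simpa using hv
  | cons c cs ih =>
    intro v hv
    rw [List.foldl_cons]
    exact ih _ (by show 1 ≤ v * 10 + (c.toNat - 48); omega)

theorem pv_decVal_pos (cs : List Char) (hne : cs ≠ []) (hall : cs.all PySem.Chars.isdigit = true)
    (hhead : cs.head? ≠ some '0') : 0 < pvDecVal cs := by
  obtain ⟨c, rest, rfl⟩ := List.exists_cons_of_ne_nil hne
  simp only [List.all_cons, Bool.and_eq_true] at hall
  have hdig := hall.1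
  have hc0 : c ≠ '0' := by simpa using hhead
  have h48 : 48 ≤ c.toNat := by
    simp only [PySem.Chars.isdigit, Bool.and_eq_true, decide_eq_true_eq, Char.le_def] at hdig
    exact hdig.1
  have hne48 : c.toNat ≠ 48 := by
    intro he
    apply hc0
    have := pv_char_eq_digitChar hdig
    rw [he] at this
    simpa using this.symm
  simp only [pvDecVal, List.foldl_cons]
  exact pv_foldl_ge_one rest _ (by omega)

theorem pv_toDigits_decVal (cs : List Char) (hall : cs.all PySem.Chars.isdigit = true)
    (hne : cs ≠ []) (hcanon : cs.length = 1 ∨ cs.head? ≠ some '0') :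
    Nat.toDigits 10 (pvDecVal cs) = cs := by
  induction cs using List.reverseRecOn with
  | nil => exact absurd rfl hne
  | append_singleton ds c ih =>
    rw [List.all_append] at hall
    simp only [Bool.and_eq_true, List.all_cons, List.all_nil, Bool.and_true] at hall
    obtain ⟨hds, hc⟩ := hall
    rcases eq_or_ne ds [] with rfl | hds_ne
    · simp only [List.nil_append]
      rw [show pvDecVal [c] = c.toNat - 48 by simp [pvDecVal]]
      rw [Nat.toDigits_of_lt_base (pv_isdigit_lt hc), pv_char_eq_digitChar hc]
    · have hhead : ds.head? ≠ some '0' := by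
        rcases hcanon with hlen | hh
        · exact absurd (by simpa [List.length_append] using hlen) hds_ne
        · rwa [List.head?_append, Option.or_of_isSome (by
            obtain ⟨a, as, rfl⟩ := List.exists_cons_of_ne_nil hds_ne
            simp)] at hh
      have hpos := pv_decVal_pos ds hds_ne hds hhead
      rw [pv_decVal_append]
      have hlt := pv_isdigit_lt hc
      have : pvDecVal ds * 10 + (c.toNat - 48) = 10 * pvDecVal ds + (c.toNat - 48) := by ring
      rw [this, ← Nat.toDigits_append_toDigits (by norm_num) hpos hlt]
      rw [ih hds hds_ne (Or.inr hhead), Nat.toDigits_of_lt_base hlt, pv_char_eq_digitChar hc]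

theorem pv_suf_toList (rid pfx : String) :
    (PySem.Str.slice rid (some (PySem.Str.len pfx)) none).toList = rid.toList.drop pfx.toList.length := by
  rw [PySem.Str.toList_slice, PySem.Str.len_eq]
  simp [PySem.Chars.slice, PySem.List.slice_from_natCast]

theorem pv_toString_toList (k : Nat) : (toString k).toList = Nat.toDigits 10 k := by
  rw [Nat.toString_eq_ofList_toDigits, String.toList_ofList]

theorem pv_pfx_toList (base : String) : (base ++ "-").toList = base.toList ++ ['-'] := by
  have h1 : ("-" : String).toList = ['-'] := by decide
  rw [String.toList_append, h1]

theorem pv_full_toList (base : String) (k : Nat) :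
    (base ++ "-" ++ toString k).toList = (base.toList ++ ['-']) ++ Nat.toDigits 10 k := by
  rw [String.toList_append, pv_pfx_toList, pv_toString_toList]

theorem pv_pyGet0 (s : String) : PySem.Str.pyGet? s 0 = s.toList.head? := by
  rw [PySem.Str.pyGet?_eq, PySem.Chars.pyGet?, PySem.List.pyGet?_zero, List.head?_eq_getElem?]

theorem pv_decode_sound (base rid : String) (k : Nat)
    (h : pvDecodeSuffix rid (base ++ "-") = some k) : rid = base ++ "-" ++ toString k := by
  unfold pvDecodeSuffix at h
  dsimp only [] at h
  split_ifs at h with hs hd hz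
  have hpre : (base ++ "-").toList <+: rid.toList := by
    rw [PySem.Str.startswith] at hs
    exact (PySem.Chars.startswith_iff _ _).mp hs
  obtain ⟨t, ht⟩ := hpre
  have hsuf : (PySem.Str.slice rid (some (PySem.Str.len (base ++ "-"))) none).toList = t := by
    rw [pv_suf_toList, ← ht, List.drop_left]
  rw [PySem.Str.strIsdigit_eq, PySem.Chars.strIsdigit, hsuf] at hd
  simp only [Bool.and_eq_true, Bool.not_eq_true'] at hd
  have htne : t ≠ [] := by
    intro he; rw [he] at hd; simp at hd
  have hk : pvDecVal t = k := by
    rw [hsuf] at h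
    simpa [pvDecVal] using h
  have hcanon : t.length = 1 ∨ t.head? ≠ some '0' := by
    rw [PySem.Str.len_eq, hsuf] at hz
    by_cases hl : t.length = 1
    · exact Or.inl hl
    · right
      intro hh
      apply hz
      refine ⟨?_, ?_⟩
      · have := List.length_pos_of_ne_nil htne
        exact_mod_cast by omega
      · rw [pv_pyGet0, hsuf]; exact hh
  have hdig := pv_toDigits_decVal t hd.2 htne hcanon
  rw [hk] at hdig
  apply String.toList_inj.mp
  rw [pv_full_toList, ← ht, pv_pfx_toList, hdig]

theorem pv_decode_complete (base rid : String) (k : Nat)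
    (h : rid = base ++ "-" ++ toString k) : pvDecodeSuffix rid (base ++ "-") = some k := by
  subst h
  have hlist := pv_full_toList base k
  have hs : PySem.Str.startswith (base ++ "-" ++ toString k) (base ++ "-") = true := by
    rw [PySem.Str.startswith, PySem.Chars.startswith_iff, hlist, pv_pfx_toList]
    exact ⟨Nat.toDigits 10 k, by simp⟩
  have hsuf : (PySem.Str.slice (base ++ "-" ++ toString k) (some (PySem.Str.len (base ++ "-"))) none).toList
      = Nat.toDigits 10 k := by
    rw [pv_suf_toList, hlist, pv_pfx_toList, List.drop_left]
  have hne : Nat.toDigits 10 k ≠ [] := List.ne_nil_of_length_pos Nat.length_toDigits_pos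
  have hd : PySem.Str.strIsdigit (PySem.Str.slice (base ++ "-" ++ toString k) (some (PySem.Str.len (base ++ "-"))) none) = true := by
    rw [PySem.Str.strIsdigit_eq, PySem.Chars.strIsdigit, hsuf]
    simp [hne, pv_toDigits_all_digit k]
  unfold pvDecodeSuffix
  rw [if_pos hs, if_pos hd, if_neg]
  · rw [hsuf]
    show some (pvDecVal (Nat.toDigits 10 k)) = some k
    exact congrArg some (pv_decVal_toDigits k)
  · rintro ⟨hl, hz⟩
    rw [PySem.Str.len_eq, hsuf] at hl
    have hk10 : ¬ (Nat.toDigits 10 k).length ≤ 1 := by exact_mod_cast by omega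
    rw [Nat.length_toDigits_le_iff (by norm_num) (by norm_num)] at hk10
    have hkne : k ≠ 0 := by omega
    apply pv_toDigits_head k hkne
    rw [pv_pyGet0, hsuf] at hz
    exact hz

-- Source B's conflict loop is A's any-scan
theorem pv_findConflict_eq (tcat : Option String) (rs : List (List (String × String))) :
    pvFindConflict tcat rs = rs.any (fun r =>
      ((PySem.Dict.ofList r).get? "category" == tcat)
        && !((PySem.Dict.ofList r).get? "source" == some "preset")) := by
  induction rs with
  | nil => rfl
  | cons r rest ih => by_cases h : (((PySem.Dict.ofList r).get? "category" == tcat)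
        && !((PySem.Dict.ofList r).get? "source" == some "preset")) = true <;>
      simp [pvFindConflict, h, ih]

-- characterisation of Source B's second loop

theorem pvScanStep_base {base pfx : String} {st : Bool × PySem.Set Nat} {r : List (String × String)}
    (h : ((PySem.Dict.ofList r).getD "id" "" == base) = true) :
    pvScanStep base pfx st r = (true, st.2) := by
  simp [pvScanStep, h]

theorem pvScanStep_dec {base pfx : String} {st : Bool × PySem.Set Nat} {r : List (String × String)} {k : Nat}
    (h : ((PySem.Dict.ofList r).getD "id" "" == base) = false)
    (hdec : pvDecodeSuffix ((PySem.Dict.ofList r).getD "id" "") pfx = some k) :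
    pvScanStep base pfx st r = (st.1, PySem.Set.add st.2 k) := by
  simp [pvScanStep, h, hdec]

theorem pvScanStep_skip {base pfx : String} {st : Bool × PySem.Set Nat} {r : List (String × String)}
    (h : ((PySem.Dict.ofList r).getD "id" "" == base) = false)
    (hdec : pvDecodeSuffix ((PySem.Dict.ofList r).getD "id" "") pfx = none) :
    pvScanStep base pfx st r = st := by
  simp [pvScanStep, h, hdec]

theorem pv_fold_fst (base pfx : String) (rs : List (List (String × String))) :
    ∀ (b0 : Bool) (s0 : PySem.Set Nat),
    (rs.foldl (pvScanStep base pfx) (b0, s0)).1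
      = (b0 || rs.any (fun r => (PySem.Dict.ofList r).getD "id" "" == base)) := by
  induction rs with
  | nil => intro b0 s0; simp
  | cons r rs ih =>
    intro b0 s0
    rw [List.foldl_cons, List.any_cons]
    cases hb : ((PySem.Dict.ofList r).getD "id" "" == base) with
    | true => rw [pvScanStep_base hb, ih]; simp
    | false =>
      cases hdec : pvDecodeSuffix ((PySem.Dict.ofList r).getD "id" "") pfx with
      | some k => rw [pvScanStep_dec hb hdec, ih]; simp
      | none => rw [pvScanStep_skip hb hdec, ih]; simp

theorem pv_fold_mem (base pfx : String) (rs : List (List (String × String))) (k : Nat) :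
    ∀ (b0 : Bool) (s0 : PySem.Set Nat),
    (k ∈ (rs.foldl (pvScanStep base pfx) (b0, s0)).2
      ↔ k ∈ s0 ∨ ∃ r ∈ rs, (PySem.Dict.ofList r).getD "id" "" ≠ base
          ∧ pvDecodeSuffix ((PySem.Dict.ofList r).getD "id" "") pfx = some k) := by
  induction rs with
  | nil => intro b0 s0; simp
  | cons r rs ih =>
    intro b0 s0
    rw [List.foldl_cons]
    cases hb : ((PySem.Dict.ofList r).getD "id" "" == base) with
    | true =>
      rw [pvScanStep_base hb, ih]
      have hbeq : (PySem.Dict.ofList r).getD "id" "" = base := beq_iff_eq.mp hb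
      constructor
      · rintro (hk | ⟨r', hr', h1, h2⟩)
        · exact Or.inl hk
        · exact Or.inr ⟨r', List.mem_cons_of_mem _ hr', h1, h2⟩
      · rintro (hk | ⟨r', hr', h1, h2⟩)
        · exact Or.inl hk
        · rcases List.mem_cons.mp hr' with rfl | hr'
          · exact absurd hbeq h1
          · exact Or.inr ⟨r', hr', h1, h2⟩
    | false =>
      have hne : (PySem.Dict.ofList r).getD "id" "" ≠ base := by
        intro he; rw [he] at hb; simp at hb
      cases hdec : pvDecodeSuffix ((PySem.Dict.ofList r).getD "id" "") pfx with
      | none =>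
        rw [pvScanStep_skip hb hdec, ih]
        constructor
        · rintro (hk | ⟨r', hr', h1, h2⟩)
          · exact Or.inl hk
          · exact Or.inr ⟨r', List.mem_cons_of_mem _ hr', h1, h2⟩
        · rintro (hk | ⟨r', hr', h1, h2⟩)
          · exact Or.inl hk
          · rcases List.mem_cons.mp hr' with rfl | hr'
            · rw [hdec] at h2; exact absurd h2 (by simp)
            · exact Or.inr ⟨r', hr', h1, h2⟩
      | some k' =>
        rw [pvScanStep_dec hb hdec, ih]
        simp only [PySem.Set.mem_add]
        constructor
        · rintro ((hk | rfl) | ⟨r', hr', h1, h2⟩)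
          · exact Or.inl hk
          · exact Or.inr ⟨r, List.mem_cons_self, hne, hdec⟩
          · exact Or.inr ⟨r', List.mem_cons_of_mem _ hr', h1, h2⟩
        · rintro (hk | ⟨r', hr', h1, h2⟩)
          · exact Or.inl (Or.inl hk)
          · rcases List.mem_cons.mp hr' with rfl | hr'
            · rw [hdec] at h2
              exact Or.inl (Or.inr (Option.some_inj.mp h2).symm)
            · exact Or.inr ⟨r', hr', h1, h2⟩

theorem pv_fold_nodup (base pfx : String) (rs : List (List (String × String))) :
    ∀ (b0 : Bool) (s0 : PySem.Set Nat), s0.Nodup →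
    ((rs.foldl (pvScanStep base pfx) (b0, s0)).2).Nodup := by
  induction rs with
  | nil => intro b0 s0 h; simpa using h
  | cons r rs ih =>
    intro b0 s0 h
    rw [List.foldl_cons]
    cases hb : ((PySem.Dict.ofList r).getD "id" "" == base) with
    | true => rw [pvScanStep_base hb]; exact ih _ _ h
    | false =>
      cases hdec : pvDecodeSuffix ((PySem.Dict.ofList r).getD "id" "") pfx with
      | none => rw [pvScanStep_skip hb hdec]; exact ih _ _ h
      | some k => rw [pvScanStep_dec hb hdec]; exact ih _ _ (PySem.Set.nodup_add _ _ h)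

theorem pv_fold_len (base pfx : String) (rs : List (List (String × String))) :
    ∀ (b0 : Bool) (s0 : PySem.Set Nat),
    ((rs.foldl (pvScanStep base pfx) (b0, s0)).2).length ≤ s0.length + rs.length := by
  induction rs with
  | nil => intro b0 s0; simp
  | cons r rs ih =>
    intro b0 s0
    rw [List.foldl_cons]
    cases hb : ((PySem.Dict.ofList r).getD "id" "" == base) with
    | true =>
      rw [pvScanStep_base hb]
      calc _ ≤ s0.length + rs.length := ih _ _
        _ ≤ _ := by simp [List.length_cons]
    | false =>
      cases hdec : pvDecodeSuffix ((PySem.Dict.ofList r).getD "id" "") pfx with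
      | none =>
        rw [pvScanStep_skip hb hdec]
        calc _ ≤ s0.length + rs.length := ih _ _
          _ ≤ _ := by simp [List.length_cons]
      | some k =>
        rw [pvScanStep_dec hb hdec]
        calc _ ≤ (PySem.Set.add s0 k).length + rs.length := ih _ _
          _ ≤ _ := by
            rw [PySem.Set.add_eq_ite]
            by_cases hmem : k ∈ s0
            · rw [if_pos hmem]; simp [List.length_cons]
            · rw [if_neg hmem]; simp [List.length_cons]; omega

-- A's while-loop returns f"{base}-{m}" when m is the first free index and the fuel covers it

theorem pv_suffixLoop_eq_mex (base : String) (ids : PySem.Set String) :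
    ∀ (f idx m : Nat), idx ≤ m →
    (∀ j, idx ≤ j → j < m → PySem.Set.contains ids (base ++ "-" ++ toString j) = true) →
    PySem.Set.contains ids (base ++ "-" ++ toString m) = false →
    m < idx + f →
    pvSuffixLoop base ids idx f = base ++ "-" ++ toString m := by
  intro f
  induction f with
  | zero => intro idx m h1 _ _ h4; omega
  | succ f ih =>
    intro idx m h1 h2 h3 h4
    rcases eq_or_lt_of_le h1 with rfl | hlt
    · rw [pvSuffixLoop, h3]; simp
    · rw [pvSuffixLoop, h2 idx le_rfl hlt]
      exact ih (idx+1) m hlt (fun j hj => h2 j (by omega)) h3 (by omega)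

-- Source B's sorted scan returns the same first free index

theorem pv_mexLoop_eq (Q : Nat → Prop) :
    ∀ (ts : List Nat) (k m : Nat), ts.Pairwise (· < ·) → (∀ j, k ≤ j → (j ∈ ts ↔ Q j)) →
    k ≤ m → (∀ j, k ≤ j → j < m → Q j) → ¬ Q m → pvMexLoop ts k = m := by
  intro ts
  induction ts with
  | nil =>
    intro k m _ hmem hkm hbelow hfree
    rcases eq_or_lt_of_le hkm with rfl | hlt
    · rfl
    · exact absurd ((hmem k le_rfl).mpr (hbelow k le_rfl hlt)) (by simp)
  | cons t ts ih =>
    intro k m hpw hmem hkm hbelow hfree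
    rw [List.pairwise_cons] at hpw
    rcases eq_or_lt_of_le hkm with rfl | hlt
    · -- m = k: first free is k; t ≠ k (else Q k), and t < k impossible? t could be < k
      have hQk : ¬ Q k := hfree
      have htk : t ≠ k := fun he => hQk ((hmem k le_rfl).mp (by simp [he]))
      rw [pvMexLoop]
      rw [if_neg htk]
      by_cases hkt : k < t
      · rw [if_pos hkt]
      · rw [if_neg hkt]
        -- t < k: recurse; all elements of ts relate as before for j ≥ k
        apply ih k k hpw.2
        · intro j hj
          rw [← hmem j hj]
          constructor
          · intro h; exact List.mem_cons_of_mem _ h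
          · intro h
            rcases List.mem_cons.mp h with rfl | h
            · omega
            · exact h
        · exact le_rfl
        · intro j hj hjk; omega
        · exact hfree
    · -- k < m : Q k holds, so k ∈ t :: ts
      have hQk : Q k := hbelow k le_rfl hlt
      have hkmem : k ∈ t :: ts := (hmem k le_rfl).mpr hQk
      rw [pvMexLoop]
      by_cases htk : t = k
      · rw [if_pos htk]
        apply ih (k+1) m hpw.2
        · intro j hj
          rw [← hmem j (by omega)]
          constructor
          · intro h; exact List.mem_cons_of_mem _ h
          · intro h
            rcases List.mem_cons.mp h with rfl | h
            · omega
            · exact h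
        · omega
        · intro j hj hjm; exact hbelow j (by omega) hjm
        · exact hfree
      · have hk_ts : k ∈ ts := by
          rcases List.mem_cons.mp hkmem with rfl | h
          · exact absurd rfl htk
          · exact h
        have htlt : t < k := hpw.1 k hk_ts
        rw [if_neg htk, if_neg (by omega)]
        apply ih k m hpw.2
        · intro j hj
          rw [← hmem j hj]
          constructor
          · intro h; exact List.mem_cons_of_mem _ h
          · intro h
            rcases List.mem_cons.mp h with rfl | h
            · omega
            · exact h
        · exact hkm
        · exact hbelow
        · exact hfree


-- ===== VERDICT (by name: the statement is the Claim_ definition above) =====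
theorem ensure_resource_py_spec : Claim_equal_ensure_resource_py := by
  intro resources template _
  unfold Spec_ensure_resource_py ensure_resource_py ensure_resource_py_alt
  rw [pv_findConflict_eq]
  dsimp only []
  cases hconf : resources.any (fun r =>
      ((PySem.Dict.ofList r).get? "category" == (PySem.Dict.ofList template).get? "category")
        && !((PySem.Dict.ofList r).get? "source" == some "preset")) with
  | true => simp
  | false =>
    rw [if_neg (by simp), if_neg (by simp)]
    congr 3
    set base := (PySem.Dict.ofList template).getD "id" "res" with hbase
    set L := resources.map (fun r => (PySem.Dict.ofList r).getD "id" "") with hL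
    set T := (List.foldl (pvScanStep base (base ++ "-")) (false, PySem.Set.empty) resources).2 with hT
    have hids : pvResourceIds resources = PySem.Set.ofList L := by
      rw [pvResourceIds, PySem.Set.ofList_eq_foldl, hL, List.foldl_map, PySem.Set.empty_eq]
    have hflag : (List.foldl (pvScanStep base (base ++ "-")) (false, PySem.Set.empty) resources).1
        = resources.any (fun r => (PySem.Dict.ofList r).getD "id" "" == base) := by
      rw [pv_fold_fst]; simp
    have hanyL : ∀ x : String,
        resources.any (fun r => (PySem.Dict.ofList r).getD "id" "" == x) = true ↔ x ∈ L := by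
      intro x
      rw [List.any_eq_true, hL]
      constructor
      · rintro ⟨r, hr, hx⟩; exact List.mem_map.mpr ⟨r, hr, beq_iff_eq.mp hx⟩
      · intro hx; obtain ⟨r, hr, hfx⟩ := List.mem_map.mp hx; exact ⟨r, hr, beq_iff_eq.mpr hfx⟩
    by_cases hbmem : base ∈ L
    · -- base is taken: A runs its while-loop, B its mex scan; both give the first free index m
      have hlen_ne : ∀ j : Nat, base ++ "-" ++ toString j ≠ base := by
        intro j he
        have h := congrArg String.toList he
        rw [pv_full_toList] at h
        have hlen := congrArg List.length h
        simp [List.length_append] at hlen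
      have hMB : ∀ j : Nat, j ∈ T ↔ (base ++ "-" ++ toString j) ∈ L := by
        intro j
        rw [hT, pv_fold_mem]
        simp only [PySem.Set.empty_eq, List.not_mem_nil, false_or]
        constructor
        · rintro ⟨r, hr, hne, hdec⟩
          have hr' := pv_decode_sound base _ j hdec
          rw [hL]; exact List.mem_map.mpr ⟨r, hr, hr'.symm.symm⟩
        · intro hmem
          obtain ⟨r, hr, hfr⟩ := List.mem_map.mp (by rw [hL] at hmem; exact hmem)
          exact ⟨r, hr, by rw [hfr]; exact hlen_ne j,
            by rw [hfr]; exact pv_decode_complete base _ j rfl⟩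
      have hnodup : T.Nodup := by
        rw [hT]; exact pv_fold_nodup _ _ _ _ _ (by simp [PySem.Set.empty_eq])
      have hlenT : T.length ≤ resources.length := by
        rw [hT]
        have := pv_fold_len base (base ++ "-") resources false PySem.Set.empty
        simpa [PySem.Set.empty_eq] using this
      -- pigeonhole: some index in 2..2+n is free
      have hex2 : ∃ i, i ≤ resources.length ∧ (2 + i) ∉ T := by
        by_contra hcon
        push Not at hcon
        have hsub : ((List.range (resources.length + 1)).map (fun i => 2 + i)) ⊆ T := by
          intro x hx
          obtain ⟨i, hi, rfl⟩ := List.mem_map.mp hx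
          exact hcon i (by simpa using List.mem_range.mp hi)
        have hnd : ((List.range (resources.length + 1)).map (fun i => 2 + i)).Nodup :=
          List.Nodup.map (fun a b => by omega) (List.nodup_range)
        have := (hnd.subperm hsub).length_le
        simp at this
        omega
      have hex : ∃ i, (2 + i) ∉ T := ⟨hex2.choose, hex2.choose_spec.2⟩
      set m := 2 + Nat.find hex with hm
      have hfree : m ∉ T := Nat.find_spec hex
      have hfind_le : Nat.find hex ≤ resources.length :=
        Nat.find_min' hex hex2.choose_spec.2 |>.trans hex2.choose_spec.1
      have hbelow : ∀ j, 2 ≤ j → j < m → j ∈ T := by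
        intro j h2 hj
        have hlt : j - 2 < Nat.find hex := by omega
        have := Nat.find_min hex hlt
        simp only [not_not] at this
        have heq : 2 + (j - 2) = j := by omega
        rwa [heq] at this
      -- A's side
      have hA : pvMakeUniqueId base (pvResourceIds resources) (resources.length + 1)
          = base ++ "-" ++ toString m := by
        rw [pvMakeUniqueId, if_pos (show PySem.Set.contains (pvResourceIds resources) base = true by rw [hids, PySem.Set.contains_eq_decide]; simp [PySem.Set.mem_ofList, hbmem])]
        apply pv_suffixLoop_eq_mex _ _ _ _ m (by omega)
        · intro j h2 hj
          rw [hids, PySem.Set.contains_eq_decide]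
          simp only [decide_eq_true_eq, PySem.Set.mem_ofList]
          exact (hMB j).mp (hbelow j h2 hj)
        · rw [hids, PySem.Set.contains_eq_decide]
          simp only [decide_eq_false_iff_not, PySem.Set.mem_ofList]
          intro hc
          exact hfree ((hMB m).mpr hc)
        · omega
      -- B's side
      have hBflag : (List.foldl (pvScanStep base (base ++ "-")) (false, PySem.Set.empty) resources).1 = true := by
        rw [hflag]; exact (hanyL base).mpr hbmem
      have hpw : (PySem.List.sorted T (fun x => x) false).Pairwise (· < ·) := by
        have hle := PySem.List.sorted_pairwise T (fun x => x)
        have hnd : (PySem.List.sorted T (fun x => x) false).Nodup :=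
          (PySem.List.sorted_perm T (fun x => x) false).nodup_iff.mpr hnodup
        exact (hle.and hnd).imp (fun {a b} h => lt_of_le_of_ne h.1 h.2)
      have hB : pvMexLoop (PySem.List.sorted T (fun x => x) false) 2 = m := by
        apply pv_mexLoop_eq (fun j => j ∈ T) _ _ m hpw
        · intro j _; exact PySem.List.mem_sorted T (fun x => x) false j
        · omega
        · exact hbelow
        · exact hfree
      rw [hA, hBflag, if_pos rfl, hB]
    · -- base is free: both return base unchanged
      have hc : PySem.Set.contains (pvResourceIds resources) base = false := by
        rw [hids, PySem.Set.contains_eq_decide]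
        simp [PySem.Set.mem_ofList, hbmem]
      have hflag0 : (List.foldl (pvScanStep base (base ++ "-")) (false, PySem.Set.empty) resources).1 = false := by
        rw [hflag]
        cases hany : resources.any (fun r => (PySem.Dict.ofList r).getD "id" "" == base)
        · rfl
        · exact absurd ((hanyL base).mp hany) hbmem
      rw [pvMakeUniqueId, if_neg (show ¬ PySem.Set.contains (pvResourceIds resources) base = true by rw [hc]; simp), hflag0]
      simp
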